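-- pv_equiv track=rewrite | github.com/mindu2kk/CodePTIT-Python | bai175doanlientiepnhohon.py | check
-- ===== SOURCE A (Python) =====
-- def check(A,n):
--     res = [0] * n
--     stack = []
--     for i in range(n):
--         while stack and A[stack[-1]] <= A[i]:
--             stack.pop()
--         res[i] = i - stack[-1] if stack else i + 1
--         stack.append(i)
--     return res
-- ===== SOURCE B (Python) =====
-- def check(A, n):
--     # res doubles as a jump table: res[j] is the distance from j to its
--     # previous strictly-greater index (j+1 if none), so j -= res[j] hops
--     # straight to that index instead of maintaining a monotonic stack.
--     res = []
--     for i in range(n):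
--         j = i - 1
--         while j >= 0 and A[j] <= A[i]:
--             j -= res[j]
--         res.append(i - j)
--     return res
-- ===== Notes on version B (the rewrite author's own statement) =====
-- stated objective: alternative
-- what changed: Replaces the monotonic stack (pop while top <= A[i], read distance from the surviving top) by a stack-free jump-pointer scan that reuses the result array itself: j starts at i-1 and hops j -= res[j] over blocks of smaller elements until a strictly greater element (or -1) is reached.
import Mathlib
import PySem

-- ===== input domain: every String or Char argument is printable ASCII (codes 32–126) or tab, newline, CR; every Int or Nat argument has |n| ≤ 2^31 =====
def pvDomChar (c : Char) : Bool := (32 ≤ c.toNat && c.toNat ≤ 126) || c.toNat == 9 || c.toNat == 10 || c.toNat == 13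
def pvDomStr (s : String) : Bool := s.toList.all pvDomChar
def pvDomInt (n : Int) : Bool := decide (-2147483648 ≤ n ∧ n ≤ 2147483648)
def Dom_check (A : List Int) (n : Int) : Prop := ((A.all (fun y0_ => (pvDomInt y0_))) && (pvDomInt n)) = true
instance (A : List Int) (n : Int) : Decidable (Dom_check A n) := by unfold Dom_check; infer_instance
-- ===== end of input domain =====

-- B drops A's monotonic stack and instead jumps backwards through the result array itself
-- (j -= res[j]) to find the previous strictly-greater index; same values, alternative algorithm.

-- ===== PORT A =====
-- the inner 'while stack and A[stack[-1]] <= A[i]: stack.pop()' (stack kept top-first)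
def popWhileA (A : List Int) (v : Int) : List Int → List Int
  | [] => []
  | t :: rest => if PySem.List.pyGetD A t 0 ≤ v then popWhileA A v rest else t :: rest

-- one iteration of A's for-loop: state = (res, stack)
def stepA (A : List Int) (st : List Int × List Int) (i : Int) : List Int × List Int :=
  let stack := popWhileA A (PySem.List.pyGetD A i 0) st.2
  let r : Int := match stack with | [] => i + 1 | t :: _ => i - t
  (PySem.List.pySetD st.1 i r, i :: stack)

def check (A : List Int) (n : Int) : List Int :=
  ((PySem.List.pyRange 0 n 1).foldl (stepA A) (List.replicate n.toNat 0, [])).1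

-- ===== PORT B =====
-- the inner 'while j >= 0 and A[j] <= A[i]: j -= res[j]' (fuel only makes it total;
-- i+1 steps always suffice since every stored distance is >= 1)
def jumpB (A res : List Int) (v : Int) : Nat → Int → Int
  | 0, j => j
  | fuel + 1, j =>
      if 0 ≤ j ∧ PySem.List.pyGetD A j 0 ≤ v then
        jumpB A res v fuel (j - PySem.List.pyGetD res j 0)
      else j

def check_alt (A : List Int) (n : Int) : List Int :=
  (PySem.List.pyRange 0 n 1).foldl
    (fun res i =>
      res ++ [i - jumpB A res (PySem.List.pyGetD A i 0) (i.toNat + 1) (i - 1)])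
    []

-- ===== PRECONDITION & SPEC =====
-- Python A raises IndexError on A[i] when n exceeds len(A); excluded (n may be negative or smaller).
def Pre_check (A : List Int) (n : Int) : Prop := n ≤ A.length
instance (A : List Int) (n : Int) : Decidable (Pre_check A n) := by unfold Pre_check; infer_instance
def pvWitness_check : List Int × Int := ([3, 1, 2], 3)
def Spec_check (A : List Int) (n : Int) (out : List Int) : Prop := out = check_alt A n
instance (A : List Int) (n : Int) (out : List Int) : Decidable (Spec_check A n out) := by unfold Spec_check; infer_instance

-- ===== CLAIM (what is proved, stated in full; the proofs are below) =====
def Claim_equal_check : Prop := ∀ (A : List Int) (n : Int), Dom_check A n → Pre_check A n → Spec_check A n (check A n)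

-- ===== LEMMAS AND PROOFS =====

-- scanP A v j = index of the nearest k < j with A[k] > v (linear search down), the common spec
def scanP (A : List Int) (v : Int) : Nat → Option Nat
  | 0 => none
  | j + 1 => if v < A.getD j 0 then some j else scanP A v j

-- the intended value at index i
def sres (A : List Int) (i : Nat) : Int :=
  match scanP A (A.getD i 0) i with
  | some k => (i : Int) - (k : Int)
  | none => (i : Int) + 1

-- A's stack after i iterations (top-first)
def stackS (A : List Int) : Nat → List Int
  | 0 => []
  | i + 1 => ((i : Nat) : Int) :: popWhileA A (A.getD i 0) (stackS A i)

theorem scanP_lt (A : List Int) (v : Int) : ∀ j k, scanP A v j = some k → k < j := by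
  intro j
  induction j with
  | zero => intro k h; simp [scanP] at h
  | succ j ih =>
    intro k h
    unfold scanP at h
    split at h
    · simp at h; omega
    · exact Nat.lt_succ_of_lt (ih k h)

theorem popWhileA_comp (A : List Int) (v w : Int) (hw : w ≤ v) :
    ∀ s, popWhileA A v (popWhileA A w s) = popWhileA A v s := by
  intro s
  induction s with
  | nil => rfl
  | cons t rest ih =>
    by_cases h : PySem.List.pyGetD A t 0 ≤ w
    · simp [popWhileA, h, le_trans h hw, ih]
    · simp [popWhileA, h]

theorem head_popWhile_stackS (A : List Int) :
    ∀ i v, (popWhileA A v (stackS A i)).head? = (scanP A v i).map (fun k => ((k : Nat) : Int)) := by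
  intro i
  induction i with
  | zero => intro v; simp [stackS, popWhileA, scanP]
  | succ i ih =>
    intro v
    unfold stackS scanP
    by_cases h : A.getD i 0 ≤ v
    · have hv : ¬ v < A.getD i 0 := by omega
      simp only [popWhileA, PySem.List.pyGetD_natCast, h, if_true, hv, if_false,
        popWhileA_comp A v (A.getD i 0) h, ih v]
    · have hv : v < A.getD i 0 := by omega
      simp only [popWhileA, PySem.List.pyGetD_natCast, h, if_false, hv, if_true]
      simp

theorem resA_val (A : List Int) (i : Nat) :
    (match popWhileA A (A.getD i 0) (stackS A i) with
      | [] => ((i : Nat) : Int) + 1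
      | t :: _ => ((i : Nat) : Int) - t) = sres A i := by
  have h := head_popWhile_stackS A i (A.getD i 0)
  unfold sres
  cases hE : popWhileA A (A.getD i 0) (stackS A i) with
  | nil =>
    rw [hE] at h
    cases hs : scanP A (A.getD i 0) i with
    | none => rfl
    | some k => rw [hs] at h; simp at h
  | cons t rest =>
    rw [hE] at h
    cases hs : scanP A (A.getD i 0) i with
    | none => rw [hs] at h; simp at h
    | some k =>
      rw [hs] at h
      simp only [List.head?_cons, Option.map_some, Option.some.injEq] at h
      rw [h]

def resArrA (A : List Int) (N m : Nat) : List Int :=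
  (List.range N).map (fun k => if k < m then sres A k else 0)

theorem foldA_inv (A : List Int) (N : Nat) :
    ∀ m, m ≤ N →
      (PySem.List.pyRange 0 (m : Int) 1).foldl (stepA A) (List.replicate N 0, [])
        = (resArrA A N m, stackS A m) := by
  intro m
  induction m with
  | zero =>
    intro _
    rw [PySem.List.pyRange_one_eq_nil (by omega)]
    simp [resArrA, stackS, List.foldl_nil, List.map_const']
  | succ m ih =>
    intro hm
    have h1 : ((m : Int) : Int) + 1 = ((m + 1 : Nat) : Int) := by push_cast; ring
    rw [← h1, PySem.List.pyRange_one_succ_right (by positivity), List.foldl_append,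
      ih (by omega)]
    simp only [List.foldl_cons, List.foldl_nil]
    unfold stepA
    simp only [PySem.List.pyGetD_natCast, PySem.List.pySetD_natCast]
    rw [resA_val A m]
    rw [Prod.mk.injEq]
    refine ⟨?_, rfl⟩
    apply List.ext_getElem
    · simp [resArrA]
    · intro k h1' h2'
      simp only [resArrA, List.getElem_set, List.getElem_map, List.getElem_range]
      by_cases hk : m = k
      · rw [if_pos hk, if_pos (by omega), hk]
      · rw [if_neg hk]
        by_cases hk2 : k < m
        · rw [if_pos hk2, if_pos (by omega)]
        · rw [if_neg hk2, if_neg (by omega)]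

theorem check_eq_spec (A : List Int) (n : Int) :
    check A n = (List.range n.toNat).map (sres A) := by
  unfold check
  by_cases hn : n ≤ 0
  · rw [PySem.List.pyRange_one_eq_nil hn]
    simp [Int.toNat_of_nonpos hn]
  · have h : n = ((n.toNat : Nat) : Int) := by omega
    rw [h]
    simp only [Int.toNat_natCast]
    rw [foldA_inv A n.toNat n.toNat le_rfl]
    unfold resArrA
    exact List.map_congr_left fun k hk => if_pos (List.mem_range.mp hk)

theorem scanP_succ (A : List Int) (v : Int) (j : Nat) :
    scanP A v (j + 1) = if v < A.getD j 0 then some j else scanP A v j := rfl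

theorem scanP_const (A : List Int) (v : Int) (a : Nat) :
    ∀ b, a ≤ b → (∀ l, a ≤ l → l < b → A.getD l 0 ≤ v) → scanP A v b = scanP A v a := by
  intro b
  induction b with
  | zero =>
    intro h _
    have ha : a = 0 := Nat.le_zero.mp h
    rw [ha]
  | succ b ih =>
    intro hab hall
    by_cases hb : a = b + 1
    · rw [hb]
    · have hab' : a ≤ b := by omega
      have hv : ¬ v < A.getD b 0 := by
        have := hall b hab' (by omega); omega
      rw [scanP_succ, if_neg hv]
      exact ih hab' (fun l hl1 hl2 => hall l hl1 (by omega))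

theorem scanP_between (A : List Int) (v : Int) :
    ∀ b, (∀ k, scanP A v b = some k → ∀ l, k < l → l < b → A.getD l 0 ≤ v)
       ∧ (scanP A v b = none → ∀ l, l < b → A.getD l 0 ≤ v) := by
  intro b
  induction b with
  | zero => exact ⟨by intro k h; simp [scanP] at h, by intro _ l hl; omega⟩
  | succ b ih =>
    constructor
    · intro k h l hkl hlb
      unfold scanP at h
      split at h
      · simp at h; omega
      · rename_i hv
        by_cases hl : l = b
        · subst hl; omega
        · exact ih.1 k h l hkl (by omega)
    · intro h l hl
      unfold scanP at h
      split at h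
      · exact absurd h (by simp)
      · rename_i hv
        by_cases hlb : l = b
        · subst hlb; omega
        · exact ih.2 h l (by omega)

theorem scanP_skip (A : List Int) (v : Int) (j : Nat) (h : A.getD j 0 ≤ v) :
    scanP A v (j + 1)
      = match scanP A (A.getD j 0) j with
        | some k => scanP A v (k + 1)
        | none => none := by
  have hv : ¬ v < A.getD j 0 := by omega
  rw [scanP_succ, if_neg hv]
  cases hs : scanP A (A.getD j 0) j with
  | none =>
    have hall := (scanP_between A (A.getD j 0) j).2 hs
    rw [scanP_const A v 0 j (Nat.zero_le j) (fun l _ hl => le_trans (hall l hl) h)]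
    rfl
  | some k =>
    have hk := scanP_lt A (A.getD j 0) j k hs
    have hall := (scanP_between A (A.getD j 0) j).1 k hs
    exact scanP_const A v (k + 1) j (by omega)
      (fun l hl1 hl2 => le_trans (hall l (by omega) hl2) h)

-- invariant of B's jump loop
def JInv (A : List Int) (v : Int) (i : Nat) (j : Int) : Prop :=
  (j = -1 ∧ scanP A v i = none) ∨ (0 ≤ j ∧ j < (i : Int) ∧ scanP A v i = scanP A v (j.toNat + 1))

theorem jump_correct (A res : List Int) (v : Int) (i : Nat)
    (hres : ∀ k, k < i → res.getD k 0 = sres A k) :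
    ∀ (fuel : Nat) (j : Int), JInv A v i j → j < (fuel : Int) →
      jumpB A res v fuel j
        = (match scanP A v i with | some k => ((k : Nat) : Int) | none => -1) := by
  intro fuel
  induction fuel with
  | zero =>
    intro j hinv hj
    rcases hinv with ⟨hj1, hs⟩ | ⟨hj0, _, _⟩
    · rw [hs, hj1]; rfl
    · omega
  | succ fuel ih =>
    intro j hinv hj
    unfold jumpB
    by_cases hc : 0 ≤ j ∧ PySem.List.pyGetD A j 0 ≤ v
    · rw [if_pos hc]
      obtain ⟨hj0, hAv⟩ := hc
      rcases hinv with ⟨hj1, _⟩ | ⟨_, hji, hscan⟩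
      · omega
      · have hji' : j.toNat < i := by omega
        have hjc : j = ((j.toNat : Nat) : Int) := by omega
        have hAv' : A.getD j.toNat 0 ≤ v := by
          rw [hjc, PySem.List.pyGetD_natCast] at hAv; exact hAv
        have hresj : PySem.List.pyGetD res j 0 = sres A j.toNat := by
          rw [hjc, PySem.List.pyGetD_natCast]; exact hres j.toNat hji'
        have hskip := scanP_skip A v j.toNat hAv'
        cases hs : scanP A (A.getD j.toNat 0) j.toNat with
        | some k =>
          have hk := scanP_lt A (A.getD j.toNat 0) j.toNat k hs
          have hval : sres A j.toNat = (j.toNat : Int) - (k : Int) := by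
            unfold sres; rw [hs]
          have hj' : j - PySem.List.pyGetD res j 0 = ((k : Nat) : Int) := by
            rw [hresj, hval]; omega
          rw [hj']
          apply ih
          · right
            refine ⟨by positivity, by omega, ?_⟩
            rw [hscan, hskip, hs]
            simp
          · omega
        | none =>
          have hval : sres A j.toNat = (j.toNat : Int) + 1 := by
            unfold sres; rw [hs]
          have hj' : j - PySem.List.pyGetD res j 0 = -1 := by
            rw [hresj, hval]; omega
          rw [hj']
          apply ih
          · left
            exact ⟨rfl, by rw [hscan, hskip, hs]⟩
          · omega
    · rw [if_neg hc]
      rcases hinv with ⟨hj1, hs⟩ | ⟨hj0, hji, hscan⟩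
      · rw [hs, hj1]
      · have hAv : ¬ PySem.List.pyGetD A j 0 ≤ v := by tauto
        have hjc : j = ((j.toNat : Nat) : Int) := by omega
        rw [hjc, PySem.List.pyGetD_natCast] at hAv
        have : v < A.getD j.toNat 0 := by omega
        have : scanP A v (j.toNat + 1) = some j.toNat := by
          unfold scanP; rw [if_pos this]
        rw [hscan, this]
        exact hjc

theorem stepB_val (A res : List Int) (i : Nat)
    (hlen : res.length = i) (hres : ∀ k, k < i → res.getD k 0 = sres A k) :
    ((i : Nat) : Int) - jumpB A res (PySem.List.pyGetD A (i : Int) 0) (((i : Int)).toNat + 1) ((i : Int) - 1)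
      = sres A i := by
  rw [PySem.List.pyGetD_natCast]
  have htn : ((i : Int)).toNat = i := by omega
  rw [htn]
  have hinv : JInv A (A.getD i 0) i ((i : Int) - 1) := by
    by_cases hi : i = 0
    · left; subst hi; exact ⟨by norm_num, rfl⟩
    · right
      refine ⟨by omega, by omega, ?_⟩
      have : ((i : Int) - 1).toNat + 1 = i := by omega
      rw [this]
  rw [jump_correct A res (A.getD i 0) i hres (i + 1) ((i : Int) - 1) hinv (by push_cast; omega)]
  unfold sres
  cases hs : scanP A (A.getD i 0) i <;> simp

theorem foldB_inv (A : List Int) :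
    ∀ m : Nat,
      (PySem.List.pyRange 0 (m : Int) 1).foldl
        (fun res i =>
          res ++ [i - jumpB A res (PySem.List.pyGetD A i 0) (i.toNat + 1) (i - 1)])
        []
      = (List.range m).map (sres A) := by
  intro m
  induction m with
  | zero => rw [PySem.List.pyRange_one_eq_nil (by omega)]; rfl
  | succ m ih =>
    have h1 : ((m : Int) : Int) + 1 = ((m + 1 : Nat) : Int) := by push_cast; ring
    rw [← h1, PySem.List.pyRange_one_succ_right (by positivity), List.foldl_append, ih]
    simp only [List.foldl_cons, List.foldl_nil]
    rw [stepB_val A ((List.range m).map (sres A)) m (by simp)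
      (fun k hk => by simp [List.getD_eq_getElem?_getD, hk])]
    rw [List.range_succ, List.map_append]
    rfl

theorem check_alt_eq_spec (A : List Int) (n : Int) :
    check_alt A n = (List.range n.toNat).map (sres A) := by
  unfold check_alt
  by_cases hn : n ≤ 0
  · rw [PySem.List.pyRange_one_eq_nil hn]
    simp [Int.toNat_of_nonpos hn]
  · have h : n = ((n.toNat : Nat) : Int) := by omega
    rw [h, foldB_inv A n.toNat]
    simp only [Int.toNat_natCast]

-- ===== VERDICT (by name: the statement is the Claim_ definition above) =====
theorem check_spec : Claim_equal_check := by
  intro A n _ _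
  unfold Spec_check
  rw [check_eq_spec, check_alt_eq_spec]
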